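-- pv_equiv track=rewrite | github.com/laportagm/NeuroVis-Repo | fix_all_remaining_syntax.py | fix_tool_syntax
-- ===== SOURCE A (Python) =====
-- from typing import List, Dict, Tuple
--
-- def fix_tool_syntax(content: str) -> Tuple[str, int]:
--     """Fix tool -> @tool"""
--     fixes = 0
--     lines = content.split('\n')
--
--     for i, line in enumerate(lines):
--         stripped = line.strip()
--         if stripped == 'tool' or (stripped.startswith('tool') and len(stripped.split()) == 1):
--             # Replace with @tool, preserving indentation
--             indent = line[:len(line) - len(line.lstrip())]
--             lines[i] = f'{indent}@tool'
--             fixes += 1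
--
--     return '\n'.join(lines), fixes
-- ===== SOURCE B (Python) =====
-- def fix_tool_syntax(content: str):
--     """Fix tool -> @tool: one pointer scan over the whole text; no split/strip/join of lines."""
--     pieces = []
--     fixes = 0
--     n = len(content)
--     start = 0
--     while True:
--         e = content.find('\n', start)
--         end = n if e == -1 else e
--         i = start
--         while i < end and content[i].isspace():   # skip indentation
--             i += 1
--         j = i
--         while j < end and not content[j].isspace():  # the first token
--             j += 1
--         k = j
--         while k < end and content[k].isspace():   # trailing whitespace
--             k += 1
--         token = content[i:j]
--         if k == end and token.startswith('tool'):
--             pieces.append(content[start:i] + '@tool')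
--             fixes += 1
--         else:
--             pieces.append(content[start:end])
--         if e == -1:
--             break
--         pieces.append('\n')
--         start = e + 1
--     return ''.join(pieces), fixes
-- ===== Notes on version B (the rewrite author's own statement) =====
-- stated objective: alternative
-- what changed: A splits the text into a line list and tests each line with strip()/startswith/split() token counting; B makes a single pointer scan over the whole text (str.find newline boundaries, then i/j/k pointer sweeps for indentation, first token and trailing whitespace) and assembles the output pieces directly.
import Mathlib
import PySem

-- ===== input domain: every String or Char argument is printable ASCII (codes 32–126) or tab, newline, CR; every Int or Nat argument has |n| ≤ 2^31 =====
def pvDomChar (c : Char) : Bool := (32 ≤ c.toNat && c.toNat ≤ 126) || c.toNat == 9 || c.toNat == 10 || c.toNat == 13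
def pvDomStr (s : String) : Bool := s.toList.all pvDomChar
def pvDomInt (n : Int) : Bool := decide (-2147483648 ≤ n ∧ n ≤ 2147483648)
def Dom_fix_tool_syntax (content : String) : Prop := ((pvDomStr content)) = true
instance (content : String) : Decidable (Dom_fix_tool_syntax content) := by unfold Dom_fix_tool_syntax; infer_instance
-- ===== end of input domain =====

-- B replaces A's per-line strip/split() token test by a single pointer scan over the whole text (objective: alternative).

-- ===== PORT A =====
-- A: lines = content.split('\n'); per line: stripped = line.strip();
--    if stripped == 'tool' or (stripped.startswith('tool') and len(stripped.split()) == 1):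
--        lines[i] = line[:len(line)-len(line.lstrip())] + '@tool'; fixes += 1
-- content.split('\n') has a non-empty separator, so PySem.Chars.split? = some (splitOn …); we use splitOn directly.
def fix_tool_syntax (content : String) : String × Int :=
  let lines := PySem.Chars.splitOn content.toList ['\n']
  let st := lines.foldl
    (fun (st : List (List Char) × Int) (line : List Char) =>
      let stripped := PySem.Chars.strip line
      if stripped = "tool".toList ∨
          (PySem.Chars.startswith stripped "tool".toList = true ∧
            (PySem.Chars.split₀ stripped).length = 1) then
        let indent := PySem.Chars.slice line none
          (some ((line.length : Int) - ((PySem.Chars.lstrip line).length : Int)))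
        (st.1 ++ [indent ++ "@tool".toList], st.2 + 1)
      else
        (st.1 ++ [line], st.2))
    ([], (0 : Int))
  (String.ofList (PySem.Chars.join ['\n'] st.1), st.2)

-- ===== PORT B =====
-- B: start/end delimit the current line (end = content.find('\n', start) or n);
--    i skips indentation, j scans the first token, k skips trailing whitespace;
--    matched ⟺ k == end and content[i:j].startswith('tool').
--    The i/j/k pointer scans are the takeWhile/dropWhile prefixes of the line below.
def fixToolAltGo (rest : List Char) : List Char × Int :=
  let line := rest.takeWhile (fun c => c != '\n')          -- content[start:end]
  let t := line.dropWhile PySem.Chars.isspace              -- i-scan: line from i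
  let token := t.takeWhile (fun c => !PySem.Chars.isspace c)   -- j-scan: content[i:j]
  let afterK := (t.dropWhile (fun c => !PySem.Chars.isspace c)).dropWhile PySem.Chars.isspace  -- k-scan
  let matched := afterK.isEmpty && PySem.Chars.startswith token "tool".toList   -- k == end and token.startswith('tool')
  let piece := if matched then line.takeWhile PySem.Chars.isspace ++ "@tool".toList else line
  if h : line.length < rest.length then                    -- e != -1: a '\n' follows the line
    let tl := fixToolAltGo (rest.drop (line.length + 1))
    (piece ++ '\n' :: tl.1, (if matched then 1 else 0) + tl.2)
  else
    (piece, if matched then 1 else 0)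
termination_by rest.length
decreasing_by simp only [List.length_drop]; omega

def fix_tool_syntax_alt (content : String) : String × Int :=
  let r := fixToolAltGo content.toList
  (String.ofList r.1, r.2)

-- ===== PRECONDITION & SPEC =====
def Spec_fix_tool_syntax (content : String) (out : String × Int) : Prop := out = fix_tool_syntax_alt content
instance (content : String) (out : String × Int) : Decidable (Spec_fix_tool_syntax content out) := by unfold Spec_fix_tool_syntax; infer_instance

-- ===== CLAIM (what is proved, stated in full; the proofs are below) =====
def Claim_equal_fix_tool_syntax : Prop := ∀ (content : String), Dom_fix_tool_syntax content → Spec_fix_tool_syntax content (fix_tool_syntax content)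

-- ===== LEMMAS AND PROOFS =====

-- Per-line forms of the two programs' tests and rewrites (proof helpers).
def toolCondA (line : List Char) : Bool :=
  decide (PySem.Chars.strip line = "tool".toList) ||
    (PySem.Chars.startswith (PySem.Chars.strip line) "tool".toList &&
      decide ((PySem.Chars.split₀ (PySem.Chars.strip line)).length = 1))

def toolCondB (line : List Char) : Bool :=
  let t := line.dropWhile PySem.Chars.isspace
  ((t.dropWhile (fun c => !PySem.Chars.isspace c)).dropWhile PySem.Chars.isspace).isEmpty &&
    PySem.Chars.startswith (t.takeWhile (fun c => !PySem.Chars.isspace c)) "tool".toList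

def fixLineA (line : List Char) : List Char :=
  if toolCondA line then
    PySem.Chars.slice line none
      (some ((line.length : Int) - ((PySem.Chars.lstrip line).length : Int))) ++ "@tool".toList
  else line

def fixLineB (line : List Char) : List Char :=
  if toolCondB line then line.takeWhile PySem.Chars.isspace ++ "@tool".toList else line

-- the '\n'-decomposition both programs traverse
def linesAux : List Char → List Char → List (List Char)
  | pre, [] => [pre]
  | pre, c :: rest => if c = '\n' then pre :: linesAux [] rest else linesAux (pre ++ [c]) rest

-- accumulator-free mirror of PySem.Chars.split₀.go
def wordsGo : List Char → List Char → List (List Char)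
  | cur, [] => if cur.isEmpty then [] else [cur.reverse]
  | cur, c :: rest =>
    if PySem.Chars.isspace c then
      if cur.isEmpty then wordsGo [] rest else cur.reverse :: wordsGo [] rest
    else wordsGo (c :: cur) rest

theorem split₀_go_eq (s : List Char) : ∀ (cur : List Char) (acc : List (List Char)),
    PySem.Chars.split₀.go s cur acc = acc.reverse ++ wordsGo cur s := by
  induction s with
  | nil => intro cur acc; rw [PySem.Chars.split₀.go, wordsGo]; split <;> simp
  | cons c rest ih =>
    intro cur acc
    rw [PySem.Chars.split₀.go, wordsGo]
    split
    · split
      · simp [ih]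
      · rw [ih]; simp
    · rw [ih]

theorem split₀_eq_wordsGo (s : List Char) : PySem.Chars.split₀ s = wordsGo [] s := by
  rw [PySem.Chars.split₀, split₀_go_eq]; simp

theorem wordsGo_ne_nil (s : List Char) : ∀ cur, cur ≠ [] → wordsGo cur s ≠ [] := by
  induction s with
  | nil => intro cur h; simp [wordsGo, h]
  | cons c rest ih =>
    intro cur h
    rw [wordsGo]
    split
    · simp [h]
    · exact ih _ (by simp)

theorem wordsGo_nil_eq_nil_iff (s : List Char) :
    wordsGo [] s = [] ↔ s.all PySem.Chars.isspace = true := by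
  induction s with
  | nil => simp [wordsGo]
  | cons c rest ih =>
    rw [wordsGo]
    by_cases hc : PySem.Chars.isspace c
    · simpa [hc] using ih
    · have h1 : wordsGo [c] rest ≠ [] := wordsGo_ne_nil rest [c] (by simp)
      simp [hc, h1]

theorem wordsGo_length_one_iff (s : List Char) : ∀ cur, cur ≠ [] →
    ((wordsGo cur s).length = 1 ↔
      (s.dropWhile (fun c => !PySem.Chars.isspace c)).all PySem.Chars.isspace = true) := by
  induction s with
  | nil => intro cur h; simp [wordsGo, h]
  | cons c rest ih =>
    intro cur h
    rw [wordsGo]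
    by_cases hc : PySem.Chars.isspace c
    · rw [if_pos hc, if_neg (by simp [h] : ¬(cur.isEmpty = true))]
      have : List.dropWhile (fun c => !PySem.Chars.isspace c) (c :: rest) = c :: rest := by
        simp [List.dropWhile_cons, hc]
      rw [this]
      simp only [List.length_cons, List.all_cons, hc, Bool.true_and]
      constructor
      · intro hl
        have hnil : wordsGo [] rest = [] := by
          cases hw : wordsGo [] rest with
          | nil => rfl
          | cons x xs =>
            rw [hw] at hl
            simp at hl
        rw [wordsGo_nil_eq_nil_iff] at hnil; exact hnil
      · intro hall
        rw [(wordsGo_nil_eq_nil_iff rest).2 hall]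
        simp
    · simp only [hc, if_neg, Bool.false_eq_true, ite_false]
      rw [ih (c :: cur) (by simp)]
      simp [List.dropWhile_cons, hc]

theorem wordsGo_all_spaces (s : List Char) (h : s.all PySem.Chars.isspace = true) :
    ∀ cur, wordsGo cur s = wordsGo cur [] := by
  induction s with
  | nil => intro cur; rfl
  | cons c rest ih =>
    intro cur
    simp only [List.all_cons, Bool.and_eq_true] at h
    conv_lhs => rw [wordsGo]
    rw [if_pos h.1]
    by_cases hcur : cur.isEmpty
    · rw [if_pos hcur, ih h.2 []]
      have : cur = [] := by simpa using hcur
      simp [this, wordsGo]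
    · rw [if_neg hcur, ih h.2 []]
      simp only [wordsGo, hcur]
      simp at hcur
      simp [hcur]

theorem wordsGo_append_spaces (s trail : List Char) (h : trail.all PySem.Chars.isspace = true) :
    ∀ cur, wordsGo cur (s ++ trail) = wordsGo cur s := by
  induction s with
  | nil => intro cur; simpa using wordsGo_all_spaces trail h cur
  | cons c rest ih =>
    intro cur
    rw [List.cons_append, wordsGo, wordsGo]
    by_cases hc : PySem.Chars.isspace c
    · rw [if_pos hc, if_pos hc]
      by_cases hcur : cur.isEmpty
      · rw [if_pos hcur, if_pos hcur, ih]
      · rw [if_neg hcur, if_neg hcur, ih]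
    · rw [if_neg hc, if_neg hc, ih]

theorem rstrip_decomp (u : List Char) :
    u = PySem.Chars.rstrip u ++ (u.reverse.takeWhile PySem.Chars.isspace).reverse ∧
      ((u.reverse.takeWhile PySem.Chars.isspace).reverse).all PySem.Chars.isspace = true := by
  constructor
  · rw [PySem.Chars.rstrip]
    have h2 := congrArg List.reverse
      (List.takeWhile_append_dropWhile (p := PySem.Chars.isspace) (l := u.reverse))
    rw [List.reverse_append, List.reverse_reverse] at h2
    exact h2.symm
  · rw [List.all_reverse]
    exact List.all_takeWhile

theorem rstrip_tool_append (u : List Char) :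
    PySem.Chars.rstrip (['t','o','o','l'] ++ u) = ['t','o','o','l'] ++ PySem.Chars.rstrip u := by
  rw [PySem.Chars.rstrip, PySem.Chars.rstrip, List.reverse_append, List.dropWhile_append]
  by_cases h : (List.dropWhile PySem.Chars.isspace u.reverse).isEmpty
  · rw [if_pos h]
    have hu : List.dropWhile PySem.Chars.isspace u.reverse = [] := by simpa using h
    rw [hu]
    simp [List.dropWhile, show PySem.Chars.isspace 'l' = false from by decide]
  · rw [if_neg h]
    simp

theorem takeWhile_tool_append (u : List Char) :
    List.takeWhile (fun c => !PySem.Chars.isspace c) (['t','o','o','l'] ++ u) =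
      ['t','o','o','l'] ++ List.takeWhile (fun c => !PySem.Chars.isspace c) u := by
  simp [show PySem.Chars.isspace 't' = false from by decide,
        show PySem.Chars.isspace 'o' = false from by decide,
        show PySem.Chars.isspace 'l' = false from by decide]

theorem dropWhile_tool_append (u : List Char) :
    List.dropWhile (fun c => !PySem.Chars.isspace c) (['t','o','o','l'] ++ u) =
      List.dropWhile (fun c => !PySem.Chars.isspace c) u := by
  simp [show PySem.Chars.isspace 't' = false from by decide,
        show PySem.Chars.isspace 'o' = false from by decide,
        show PySem.Chars.isspace 'l' = false from by decide]

theorem wordsGo_tool_append (u : List Char) :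
    wordsGo [] (['t','o','o','l'] ++ u) = wordsGo ['l','o','o','t'] u := by
  simp [wordsGo, show PySem.Chars.isspace 't' = false from by decide,
        show PySem.Chars.isspace 'o' = false from by decide,
        show PySem.Chars.isspace 'l' = false from by decide]

theorem rstrip_prefix (t : List Char) : PySem.Chars.rstrip t <+: t := by
  rw [PySem.Chars.rstrip]
  rw [← List.reverse_reverse t]
  rw [List.reverse_prefix]
  simpa using List.dropWhile_suffix PySem.Chars.isspace

theorem cond_eq (line : List Char) : toolCondA line = toolCondB line := by
  have htool : "tool".toList = ['t','o','o','l'] := by decide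
  unfold toolCondA toolCondB
  simp only [htool]
  have hstrip : PySem.Chars.strip line = PySem.Chars.rstrip (line.dropWhile PySem.Chars.isspace) := by
    simp [PySem.Chars.strip, PySem.Chars.lstrip]
  rw [hstrip]
  rw [Bool.eq_iff_iff]
  simp only [Bool.or_eq_true, Bool.and_eq_true, decide_eq_true_eq, PySem.Chars.startswith_iff,
    List.isEmpty_iff, List.dropWhile_eq_nil_iff]
  by_cases hpre : ['t','o','o','l'] <+: line.dropWhile PySem.Chars.isspace
  · obtain ⟨u, hu⟩ := hpre
    rw [← hu, rstrip_tool_append, takeWhile_tool_append, dropWhile_tool_append,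
      split₀_eq_wordsGo]
    obtain ⟨hdecomp, htrail⟩ := rstrip_decomp u
    have hw : wordsGo [] (['t','o','o','l'] ++ PySem.Chars.rstrip u) = wordsGo ['l','o','o','t'] u := by
      rw [← wordsGo_tool_append u]
      conv_rhs => rw [hdecomp]
      rw [← List.append_assoc]
      exact (wordsGo_append_spaces _ _ htrail []).symm
    rw [hw]
    have hkey := wordsGo_length_one_iff u ['l','o','o','t'] (by simp)
    have hpre2 : ['t','o','o','l'] <+: ['t','o','o','l'] ++ PySem.Chars.rstrip u := List.prefix_append _ _
    have hpre3 : ['t','o','o','l'] <+: ['t','o','o','l'] ++ List.takeWhile (fun c => !PySem.Chars.isspace c) u := List.prefix_append _ _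
    constructor
    · rintro (heq | ⟨-, hlen⟩)
      · -- rstrip u = [], i.e. u is all spaces
        have hru : PySem.Chars.rstrip u = [] := by simpa using heq
        have hall : u.all PySem.Chars.isspace = true := by
          conv_lhs => rw [hdecomp]
          simp [hru, htrail]
        refine ⟨fun x hx => ?_, hpre3⟩
        have := List.dropWhile_suffix (l := u) (fun c => !PySem.Chars.isspace c)
        have hxu : x ∈ u := this.subset hx
        simpa using (List.all_eq_true.1 hall) x hxu
      · refine ⟨?_, hpre3⟩
        have := (hkey.1 hlen)
        intro x hx
        simpa using (List.all_eq_true.1 this) x hx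
    · rintro ⟨hall, -⟩
      right
      refine ⟨hpre2, hkey.2 ?_⟩
      rw [List.all_eq_true]
      intro x hx
      simpa using hall x hx
  · have hA1 : ¬ PySem.Chars.rstrip (line.dropWhile PySem.Chars.isspace) = ['t','o','o','l'] := by
      intro h
      exact hpre (h ▸ rstrip_prefix _)
    have hA2 : ¬ ['t','o','o','l'] <+: PySem.Chars.rstrip (line.dropWhile PySem.Chars.isspace) := by
      intro h
      exact hpre (h.trans (rstrip_prefix _))
    have hB : ¬ ['t','o','o','l'] <+: List.takeWhile (fun c => !PySem.Chars.isspace c) (line.dropWhile PySem.Chars.isspace) := by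
      intro h
      exact hpre (h.trans (List.takeWhile_prefix _))
    constructor
    · rintro (heq | ⟨hp, -⟩)
      · exact absurd heq hA1
      · exact absurd hp hA2
    · rintro ⟨-, hp⟩
      exact absurd hp hB

theorem indent_eq (line : List Char) :
    PySem.Chars.slice line none
        (some ((line.length : Int) - ((PySem.Chars.lstrip line).length : Int))) =
      line.takeWhile PySem.Chars.isspace := by
  have hlen : (List.takeWhile PySem.Chars.isspace line).length +
      (List.dropWhile PySem.Chars.isspace line).length = line.length := by
    rw [← List.length_append, List.takeWhile_append_dropWhile]
  have hcast : (line.length : Int) - ((PySem.Chars.lstrip line).length : Int) =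
      ((List.takeWhile PySem.Chars.isspace line).length : Int) := by
    simp only [PySem.Chars.lstrip]
    omega
  rw [hcast, PySem.Chars.slice_eq_listSlice, PySem.List.slice_to_natCast]
  have h3 : List.take (List.takeWhile PySem.Chars.isspace line).length
      (List.takeWhile PySem.Chars.isspace line ++ List.dropWhile PySem.Chars.isspace line) =
      List.takeWhile PySem.Chars.isspace line := List.take_left
  rwa [List.takeWhile_append_dropWhile] at h3

theorem fixLine_eq (line : List Char) : fixLineA line = fixLineB line := by
  rw [fixLineA, fixLineB, cond_eq, indent_eq]

theorem splitOn_go_linesAux : ∀ (fuel : Nat) (l cur : List Char) (acc : List (List Char)),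
    l.length < fuel →
    PySem.Chars.splitOn.go ['\n'] fuel l cur acc = acc.reverse ++ linesAux cur.reverse l := by
  intro fuel
  induction fuel with
  | zero => intro l cur acc h; omega
  | succ fuel ih =>
    intro l cur acc h
    cases l with
    | nil =>
      rw [PySem.Chars.splitOn.go, linesAux]
      · simp
      · intro h0; omega
    | cons c rest =>
      rw [PySem.Chars.splitOn.go, linesAux]
      by_cases hc : c = '\n'
      · rw [if_pos (by simp [hc] : List.isPrefixOf ['\n'] (c :: rest) = true), if_pos hc]
        rw [ih _ _ _ (by simpa using Nat.lt_of_succ_lt_succ h)]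
        rw [List.reverse_cons, List.append_assoc, List.singleton_append, List.reverse_nil,
          show List.drop (['\n'].length) (c :: rest) = rest from rfl]
      · rw [if_neg (by simp only [List.isPrefixOf, List.isPrefixOf_nil_left, Bool.and_true, beq_iff_eq]; exact Ne.symm hc), if_neg hc]
        rw [ih _ _ _ (by simpa using Nat.lt_of_succ_lt_succ h)]
        rw [List.reverse_cons]

theorem splitOn_eq_linesAux (cs : List Char) :
    PySem.Chars.splitOn cs ['\n'] = linesAux [] cs := by
  rw [PySem.Chars.splitOn, splitOn_go_linesAux _ _ _ _ (by omega)]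
  simp

theorem linesAux_ne_nil (l pre : List Char) : linesAux pre l ≠ [] := by
  induction l generalizing pre with
  | nil => simp [linesAux]
  | cons c rest ih =>
    rw [linesAux]
    split
    · simp
    · exact ih _

theorem linesAux_no_newline (l : List Char) (h : ∀ c ∈ l, c ≠ '\n') :
    ∀ pre, linesAux pre l = [pre ++ l] := by
  induction l with
  | nil => intro pre; simp [linesAux]
  | cons c rest ih =>
    intro pre
    rw [linesAux, if_neg (h c (by simp))]
    rw [ih (fun x hx => h x (by simp [hx]))]
    simp

theorem linesAux_split (a rest : List Char) (h : ∀ c ∈ a, c ≠ '\n') :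
    ∀ pre, linesAux pre (a ++ '\n' :: rest) = (pre ++ a) :: linesAux [] rest := by
  induction a with
  | nil => intro pre; rw [List.nil_append, linesAux, if_pos rfl]; simp
  | cons c a' ih =>
    intro pre
    rw [List.cons_append, linesAux, if_neg (h c (by simp))]
    rw [ih (fun x hx => h x (by simp [hx]))]
    simp

theorem join_cons (a : List Char) (l : List (List Char)) (h : l ≠ []) :
    PySem.Chars.join ['\n'] (a :: l) = a ++ '\n' :: PySem.Chars.join ['\n'] l := by
  cases l with
  | nil => exact absurd rfl h
  | cons b l' =>
    rw [PySem.Chars.join, PySem.Chars.join]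
    simp [List.intercalate]

theorem matched_eq_toolCondB (line : List Char) :
    ((((line.dropWhile PySem.Chars.isspace).dropWhile (fun c => !PySem.Chars.isspace c)).dropWhile
        PySem.Chars.isspace).isEmpty &&
      PySem.Chars.startswith
        ((line.dropWhile PySem.Chars.isspace).takeWhile (fun c => !PySem.Chars.isspace c))
        "tool".toList) = toolCondB line := rfl

theorem altGo_spec (cs : List Char) :
    fixToolAltGo cs = (PySem.Chars.join ['\n'] ((linesAux [] cs).map fixLineB),
      ((linesAux [] cs).countP toolCondB : Int)) := by
  suffices H : ∀ (n : Nat) (cs : List Char), cs.length ≤ n →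
      fixToolAltGo cs = (PySem.Chars.join ['\n'] ((linesAux [] cs).map fixLineB),
        ((linesAux [] cs).countP toolCondB : Int)) from H cs.length cs le_rfl
  intro n
  induction n with
  | zero =>
    intro cs hl
    have hcs : cs = [] := List.eq_nil_of_length_eq_zero (by omega)
    subst hcs
    rw [fixToolAltGo]
    simp only [List.takeWhile_nil, List.dropWhile_nil, List.length_nil, lt_irrefl, dif_neg,
      not_false_eq_true]
    rw [linesAux]
    simp [PySem.Chars.join, List.intercalate, fixLineB, toolCondB, PySem.Chars.startswith,
      List.isPrefixOf]
  | succ n ih =>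
    intro cs hl
    rw [fixToolAltGo]
    simp only [matched_eq_toolCondB]
    by_cases hd : List.dropWhile (fun c => c != '\n') cs = []
    · have hline : cs.takeWhile (fun c => c != '\n') = cs := by
        conv_rhs => rw [← List.takeWhile_append_dropWhile (p := fun c => c != '\n') (l := cs)]
        rw [hd, List.append_nil]
      have hnl : ∀ c ∈ cs, c ≠ '\n' := by
        intro c hc
        have := List.dropWhile_eq_nil_iff.1 hd c hc
        simpa using this
      rw [dif_neg (by rw [hline]; omega)]
      rw [linesAux_no_newline cs hnl []]
      rw [hline]
      simp [PySem.Chars.join, List.intercalate, fixLineB]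
    · have hhead : (List.dropWhile (fun c => c != '\n') cs).head hd = '\n' := by
        have := List.head_dropWhile_not (p := fun c => c != '\n') (l := cs) hd
        simpa using this
      obtain ⟨a, tail, htail⟩ := List.exists_cons_of_ne_nil hd
      have ha : a = '\n' := by
        have h2 := List.head_dropWhile_not (p := fun c => c != '\n') (l := cs) hd
        have h3 : (List.dropWhile (fun c => c != '\n') cs).head hd = a := by simp [htail]
        rw [h3] at h2
        simpa using h2
      rw [ha] at htail
      set line := cs.takeWhile (fun c => c != '\n') with hlinedef
      have hcs : cs = line ++ '\n' :: tail := by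
        rw [hlinedef, ← htail, List.takeWhile_append_dropWhile]
      have hnlline : ∀ c ∈ line, c ≠ '\n' := by
        intro c hc
        have := List.mem_takeWhile_imp hc
        simpa using this
      have hlt : line.length < cs.length := by
        rw [hcs]; simp
      rw [dif_pos hlt]
      have hdrop : cs.drop (line.length + 1) = tail := by
        rw [hcs, List.drop_length_add_append]
        rfl
      rw [hdrop]
      have hlines : linesAux [] cs = line :: linesAux [] tail := by
        conv_lhs => rw [hcs]
        rw [linesAux_split line tail hnlline []]
        simp
      rw [hlines]
      rw [ih tail (by rw [hcs] at hl; simp at hl; omega)]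
      rw [List.map_cons, join_cons _ _ (by simp [linesAux_ne_nil])]
      simp only [List.countP_cons, Prod.mk.injEq]
      refine ⟨by by_cases m : toolCondB line <;> simp [fixLineB, m], ?_⟩
      by_cases m : toolCondB line <;> simp [m] <;> push_cast <;> ring

theorem stepA_eq (st : List (List Char) × Int) (line : List Char) :
    (let stripped := PySem.Chars.strip line
      if stripped = "tool".toList ∨
          (PySem.Chars.startswith stripped "tool".toList = true ∧
            (PySem.Chars.split₀ stripped).length = 1) then
        let indent := PySem.Chars.slice line none
          (some ((line.length : Int) - ((PySem.Chars.lstrip line).length : Int)))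
        (st.1 ++ [indent ++ "@tool".toList], st.2 + 1)
      else
        (st.1 ++ [line], st.2)) =
      (st.1 ++ [fixLineA line], st.2 + if toolCondA line then 1 else 0) := by
  simp only []
  have hiff : toolCondA line = true ↔
      (PySem.Chars.strip line = "tool".toList ∨
        (PySem.Chars.startswith (PySem.Chars.strip line) "tool".toList = true ∧
          (PySem.Chars.split₀ (PySem.Chars.strip line)).length = 1)) := by
    simp [toolCondA]
  by_cases hP : toolCondA line = true
  · rw [if_pos (hiff.1 hP), fixLineA, if_pos hP, hP]
    simp
  · rw [if_neg (fun h => hP (hiff.2 h)), fixLineA, if_neg hP]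
    simp [Bool.eq_false_iff.2 (fun h => hP h)]

theorem foldlA_spec (lines : List (List Char)) :
    ∀ (acc : List (List Char)) (k : Int),
    List.foldl
      (fun (st : List (List Char) × Int) (line : List Char) =>
        let stripped := PySem.Chars.strip line
        if stripped = "tool".toList ∨
            (PySem.Chars.startswith stripped "tool".toList = true ∧
              (PySem.Chars.split₀ stripped).length = 1) then
          let indent := PySem.Chars.slice line none
            (some ((line.length : Int) - ((PySem.Chars.lstrip line).length : Int)))
          (st.1 ++ [indent ++ "@tool".toList], st.2 + 1)
        else
          (st.1 ++ [line], st.2))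
      (acc, k) lines = (acc ++ lines.map fixLineA, k + (lines.countP toolCondA : Int)) := by
  induction lines with
  | nil => intro acc k; simp
  | cons line rest ihl =>
    intro acc k
    rw [List.foldl_cons, stepA_eq, ihl]
    simp only [List.map_cons, List.countP_cons, Prod.mk.injEq]
    refine ⟨by simp, ?_⟩
    by_cases m : toolCondA line <;> simp [m] <;> push_cast <;> ring

theorem a_spec (content : String) :
    fix_tool_syntax content =
      (String.ofList (PySem.Chars.join ['\n'] ((linesAux [] content.toList).map fixLineA)),
        ((linesAux [] content.toList).countP toolCondA : Int)) := by
  rw [fix_tool_syntax]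
  simp only [splitOn_eq_linesAux, foldlA_spec]
  simp

-- ===== VERDICT (by name: the statement is the Claim_ definition above) =====
theorem fix_tool_syntax_spec : Claim_equal_fix_tool_syntax := by
  intro content _
  unfold Spec_fix_tool_syntax
  rw [a_spec, fix_tool_syntax_alt, altGo_spec]
  have hmap : (linesAux [] content.toList).map fixLineA = (linesAux [] content.toList).map fixLineB :=
    List.map_congr_left (fun line _ => fixLine_eq line)
  have hcnt : (linesAux [] content.toList).countP toolCondA = (linesAux [] content.toList).countP toolCondB :=
    List.countP_congr (fun line _ => by rw [cond_eq])
  simp [hmap, hcnt]
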